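-- pv_equiv track=rewrite | github.com/martinsph/restaurant-orders | src/analyze_log.py | hungry_days_per_person
-- ===== SOURCE A (Python) =====
-- def hungry_days_per_person(data, person):
--     weekdays = set()
--     full_belly_days = set()
--
--     for order in data:
--         weekdays.add(order[2])
--
--     for order in data:
--         if order[0] == person:
--             full_belly_days.add(order[2])
--
--     return weekdays.difference(full_belly_days)
-- ===== SOURCE B (Python) =====
-- def hungry_days_per_person(data, person):
--     by_day = {}
--     for order in data:
--         by_day.setdefault(order[2], set()).add(order[0])
--     return {day for day, persons in by_day.items() if person not in persons}
-- ===== Notes on version B (the rewrite author's own statement) =====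
-- stated objective: alternative
-- what changed: B builds a single per-day dict mapping each day to the set of persons who ordered that day in one pass, then filters the grouped days by membership, instead of A's two flat day-sets combined with set.difference.
import Mathlib
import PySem

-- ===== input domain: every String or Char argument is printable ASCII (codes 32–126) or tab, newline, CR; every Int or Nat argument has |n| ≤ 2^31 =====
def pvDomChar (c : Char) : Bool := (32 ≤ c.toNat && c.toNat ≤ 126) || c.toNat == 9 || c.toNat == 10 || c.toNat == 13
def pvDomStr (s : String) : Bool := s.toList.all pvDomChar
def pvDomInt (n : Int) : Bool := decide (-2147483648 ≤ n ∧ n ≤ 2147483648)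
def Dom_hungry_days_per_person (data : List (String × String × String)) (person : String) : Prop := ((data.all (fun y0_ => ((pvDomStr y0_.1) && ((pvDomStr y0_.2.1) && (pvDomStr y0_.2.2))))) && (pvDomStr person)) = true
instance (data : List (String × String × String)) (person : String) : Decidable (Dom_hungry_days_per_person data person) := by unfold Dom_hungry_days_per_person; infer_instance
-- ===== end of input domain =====

-- B groups orders into one per-day dict (day → set of persons who ate that day) in a single
-- pass and filters the grouped days by membership, instead of A's two flat day-sets and
-- set.difference; objective: alternative decomposition, same cost.

-- ===== PORT A =====
def hungry_days_per_person (data : List (String × String × String)) (person : String) : List String :=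
  -- weekdays = set(); for order in data: weekdays.add(order[2])
  let weekdays : PySem.Set String :=
    data.foldl (fun s order => PySem.Set.add s order.2.2) PySem.Set.empty
  -- full_belly_days = set(); for order in data: if order[0] == person: full_belly_days.add(order[2])
  let full_belly_days : PySem.Set String :=
    data.foldl (fun s order => if order.1 == person then PySem.Set.add s order.2.2 else s)
      PySem.Set.empty
  PySem.Set.diff weekdays full_belly_days

-- ===== PORT B =====
def hungry_days_per_person_alt (data : List (String × String × String)) (person : String) : List String :=
  -- by_day = {}; for order in data: by_day.setdefault(order[2], set()).add(order[0])
  let by_day : PySem.Dict String (PySem.Set String) :=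
    data.foldl
      (fun d order => d.modify order.2.2 PySem.Set.empty (fun s => PySem.Set.add s order.1))
      PySem.Dict.empty
  -- {day for day, persons in by_day.items() if person not in persons}
  PySem.Set.ofList
    (((by_day.items.filter (fun p => !(PySem.Set.contains p.2 person))).map (·.1)))

-- ===== PRECONDITION & SPEC =====
def Spec_hungry_days_per_person (data : List (String × String × String)) (person : String) (out : List String) : Prop := out = hungry_days_per_person_alt data person
instance (data : List (String × String × String)) (person : String) (out : List String) : Decidable (Spec_hungry_days_per_person data person out) := by unfold Spec_hungry_days_per_person; infer_instance

-- ===== CLAIM (what is proved, stated in full; the proofs are below) =====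
def Claim_equal_hungry_days_per_person : Prop := ∀ (data : List (String × String × String)) (person : String), Dom_hungry_days_per_person data person → Spec_hungry_days_per_person data person (hungry_days_per_person data person)

-- ===== LEMMAS AND PROOFS =====

-- Who ate on day k, per B's grouping dict: person ∈ by_day.get(k, set()) ↔ some order of
-- that day was placed by person.
theorem mem_getD_group (data : List (String × String × String)) (person : String)
    (d : PySem.Dict String (PySem.Set String)) (k : String) :
    person ∈ (data.foldl
        (fun d order => d.modify order.2.2 PySem.Set.empty (fun s => PySem.Set.add s order.1))
        d).getD k PySem.Set.empty
      ↔ person ∈ d.getD k PySem.Set.empty ∨ ∃ o ∈ data, o.2.2 = k ∧ o.1 = person := by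
  induction data generalizing d with
  | nil => simp
  | cons o t ih =>
    simp only [List.foldl_cons]
    rw [ih, PySem.Dict.getD_modify]
    by_cases h : k = o.2.2
    · subst h
      rw [if_pos rfl, PySem.Set.mem_add]
      constructor
      · rintro (⟨hm | hp⟩ | ⟨x, hx, hk, hp⟩)
        · exact Or.inl hm
        · exact Or.inr ⟨o, List.mem_cons_self, rfl, hp.symm⟩
        · exact Or.inr ⟨x, List.mem_cons_of_mem _ hx, hk, hp⟩
      · rintro (hm | ⟨x, hx, hk, hp⟩)
        · exact Or.inl (Or.inl hm)
        · rcases List.mem_cons.mp hx with hx | hx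
          · exact Or.inl (Or.inr (hx ▸ hp.symm))
          · exact Or.inr ⟨x, hx, hk, hp⟩
    · rw [if_neg h]
      constructor
      · rintro (hm | ⟨x, hx, hk, hp⟩)
        · exact Or.inl hm
        · exact Or.inr ⟨x, List.mem_cons_of_mem _ hx, hk, hp⟩
      · rintro (hm | ⟨x, hx, hk, hp⟩)
        · exact Or.inl hm
        · rcases List.mem_cons.mp hx with hx | hx
          · exact absurd (hx ▸ hk) (fun hh => h hh.symm)
          · exact Or.inr ⟨x, hx, hk, hp⟩

-- Membership in A's full_belly_days set.
theorem mem_full (data : List (String × String × String)) (person : String) (x : String) :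
    x ∈ data.foldl (fun s order => if order.1 == person then PySem.Set.add s order.2.2 else s)
        (PySem.Set.empty : PySem.Set String)
      ↔ ∃ o ∈ data, o.1 = person ∧ x = o.2.2 := by
  rw [show (fun (s : PySem.Set String) (order : String × String × String) =>
        if order.1 == person then PySem.Set.add s order.2.2 else s)
      = (fun s order => if order.1 = person then PySem.Set.add s order.2.2 else s) by
    funext s o; simp]
  rw [PySem.List.foldl_ite_eq_foldl_filter (p := fun o : String × String × String => o.1 = person)
      (f := fun s o => PySem.Set.add s o.2.2)]
  rw [PySem.Set.mem_foldl_add]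
  simp [List.mem_filter]

theorem hungry_eq (data : List (String × String × String)) (person : String) :
    hungry_days_per_person data person = hungry_days_per_person_alt data person := by
  show PySem.Set.diff
      (data.foldl (fun s order => PySem.Set.add s order.2.2) PySem.Set.empty)
      (data.foldl (fun s order => if order.1 == person then PySem.Set.add s order.2.2 else s)
        PySem.Set.empty)
    = PySem.Set.ofList
        ((((data.foldl
            (fun d order => d.modify order.2.2 PySem.Set.empty (fun s => PySem.Set.add s order.1))
            PySem.Dict.empty).items.filter
          (fun p => !(PySem.Set.contains p.2 person))).map (·.1)))
  have hkeysnd : ((data.foldl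
      (fun d order => d.modify order.2.2 PySem.Set.empty (fun s => PySem.Set.add s order.1))
      PySem.Dict.empty)).keys.Nodup :=
    PySem.Dict.nodup_keys_foldl_modify_key data (fun o => o.2.2) PySem.Set.empty
      (fun _ o => fun s => PySem.Set.add s o.1) PySem.Dict.empty (by simp)
  have hkeys : ((data.foldl
      (fun d order => d.modify order.2.2 PySem.Set.empty (fun s => PySem.Set.add s order.1))
      PySem.Dict.empty)).keys = PySem.Set.ofList (data.map (fun o => o.2.2)) := by
    rw [PySem.Dict.keys_foldl_modify_key data (fun o => o.2.2) PySem.Set.empty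
      (fun _ o => fun s => PySem.Set.add s o.1) PySem.Dict.empty]
    exact PySem.Set.update_nil_left _
  have hweek : data.foldl (fun s order => PySem.Set.add s order.2.2)
      (PySem.Set.empty : PySem.Set String) = PySem.Set.ofList (data.map (fun o => o.2.2)) := by
    rw [← PySem.Set.update_map_eq_foldl_add]
    exact PySem.Set.update_nil_left _
  rw [PySem.Dict.items_eq_map_keys _ hkeysnd PySem.Set.empty, List.filter_map, List.map_map]
  simp only [Function.comp_def]
  rw [hkeys, hweek, List.map_id']
  have hfilt : (List.filter
      (fun k => !PySem.Set.contains
        ((data.foldl (fun d order => d.modify order.2.2 PySem.Set.empty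
            (fun s => PySem.Set.add s order.1)) PySem.Dict.empty).getD k PySem.Set.empty) person)
      (PySem.Set.ofList (data.map (fun o => o.2.2)))).Nodup :=
    (PySem.Set.nodup_ofList _).filter _
  rw [PySem.Set.ofList_eq_self_of_nodup _ hfilt, PySem.Set.diff]
  apply List.filter_congr
  intro x _
  congr 1
  rw [Bool.eq_iff_iff, PySem.Set.contains_iff, PySem.Set.contains_iff, mem_full, mem_getD_group]
  simp [PySem.Dict.getD, PySem.Dict.empty, PySem.Dict.get?]

-- ===== VERDICT (by name: the statement is the Claim_ definition above) =====
theorem hungry_days_per_person_spec : Claim_equal_hungry_days_per_person := by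
  intro data person _
  unfold Spec_hungry_days_per_person
  exact hungry_eq data person
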